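-- pv_equiv track=rewrite | github.com/jeremylongshore/bobs-brain | src/skidsteer_scraper.py | _check_if_verified
-- ===== SOURCE A (Python) =====
-- def _check_if_verified(content: str) -> bool:
--     """Check if solution is verified"""
--     verified_indicators = [
--         "confirmed",
--         "verified",
--         "worked for me",
--         "solved",
--         "fixed",
--         "this works",
--         "can confirm",
--         "tested and working",
--     ]
--
--     content_lower = content.lower()
--     return any(indicator in content_lower for indicator in verified_indicators)
-- ===== SOURCE B (Python) =====
-- _INDICATORS = (
--     "confirmed",
--     "verified",
--     "worked for me",
--     "solved",
--     "fixed",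
--     "this works",
--     "can confirm",
--     "tested and working",
-- )
--
-- def _check_if_verified(content: str) -> bool:
--     """One left-to-right scan over positions of the lowered text: at each
--     position test whether any indicator starts there (str.startswith with a
--     tuple), instead of eight independent substring searches."""
--     content_lower = content.lower()
--     for i in range(len(content_lower)):
--         if content_lower.startswith(_INDICATORS, i):
--             return True
--     return False
-- ===== Notes on version B (the rewrite author's own statement) =====
-- stated objective: alternative
-- what changed: A runs eight independent containment searches, one per indicator, over the lowered text; B makes a single left-to-right scan over the positions of the lowered text and at each position tests whether any indicator starts there, via str.startswith with the tuple of indicators.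
import Mathlib
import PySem

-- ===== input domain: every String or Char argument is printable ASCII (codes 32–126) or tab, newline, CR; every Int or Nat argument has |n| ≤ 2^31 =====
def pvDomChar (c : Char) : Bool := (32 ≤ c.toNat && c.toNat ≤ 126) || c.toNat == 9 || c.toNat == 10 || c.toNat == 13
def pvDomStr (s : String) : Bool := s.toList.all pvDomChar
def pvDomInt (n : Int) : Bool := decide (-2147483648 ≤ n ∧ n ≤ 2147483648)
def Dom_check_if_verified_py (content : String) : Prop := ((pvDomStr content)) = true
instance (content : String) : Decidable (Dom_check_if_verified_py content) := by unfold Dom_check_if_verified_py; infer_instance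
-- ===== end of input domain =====

-- B replaces eight independent substring searches with one left-to-right scan
-- over positions of the lowered text, testing at each position whether any
-- indicator starts there (objective: alternative; same asymptotic cost).

-- ===== PORT A =====
def verified_indicators : List String :=
  ["confirmed", "verified", "worked for me", "solved", "fixed",
   "this works", "can confirm", "tested and working"]

def check_if_verified_py (content : String) : Bool :=
  let content_lower := PySem.Str.lower content
  verified_indicators.any (fun indicator => PySem.Str.isIn indicator content_lower)

-- ===== PORT B =====
def altIndicators : List (List Char) :=
  ["confirmed".toList, "verified".toList, "worked for me".toList, "solved".toList,
   "fixed".toList, "this works".toList, "can confirm".toList, "tested and working".toList]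

-- the position scan: at each suffix (= position i) test startswith, else advance
def altScan : List Char → Bool
  | [] => false
  | c :: t => altIndicators.any (fun p => PySem.Chars.startswith (c :: t) p) || altScan t

def check_if_verified_py_alt (content : String) : Bool :=
  altScan (PySem.Str.lower content).toList

-- ===== PRECONDITION & SPEC =====
def Spec_check_if_verified_py (content : String) (out : Bool) : Prop := out = check_if_verified_py_alt content
instance (content : String) (out : Bool) : Decidable (Spec_check_if_verified_py content out) := by unfold Spec_check_if_verified_py; infer_instance

-- ===== CLAIM (what is proved, stated in full; the proofs are below) =====
def Claim_equal_check_if_verified_py : Prop := ∀ (content : String), Dom_check_if_verified_py content → Spec_check_if_verified_py content (check_if_verified_py content)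

-- ===== LEMMAS AND PROOFS =====

-- the scan finds exactly the indicators that are a prefix of some suffix
theorem altScan_iff (s : List Char) :
    altScan s = true ↔ ∃ p ∈ altIndicators, ∃ j, p <+: s.drop j := by
  induction s with
  | nil =>
    simp only [altScan, List.drop_nil]
    constructor
    · intro h; exact absurd h (by decide)
    · rintro ⟨p, hp, j, hpre⟩
      have : p = [] := List.prefix_nil.mp hpre
      subst this
      exact absurd hp (by decide)
  | cons c t ih =>
    simp only [altScan, Bool.or_eq_true, List.any_eq_true, ih,
      PySem.Chars.startswith_iff]
    constructor
    · rintro (⟨p, hp, hpre⟩ | ⟨p, hp, j, hpre⟩)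
      · exact ⟨p, hp, 0, by simpa using hpre⟩
      · exact ⟨p, hp, j + 1, by simpa using hpre⟩
    · rintro ⟨p, hp, j, hpre⟩
      cases j with
      | zero => exact Or.inl ⟨p, hp, by simpa using hpre⟩
      | succ j => exact Or.inr ⟨p, hp, j, by simpa using hpre⟩

-- ===== VERDICT (by name: the statement is the Claim_ definition above) =====
theorem check_if_verified_py_spec : Claim_equal_check_if_verified_py := by
  intro content _
  show check_if_verified_py content = check_if_verified_py_alt content
  unfold check_if_verified_py check_if_verified_py_alt
  apply Bool.eq_iff_iff.mpr
  simp only [List.any_eq_true, PySem.Str.isIn_iff_infix, altScan_iff]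
  constructor
  · rintro ⟨ind, hind, hinf⟩
    refine ⟨ind.toList, ?_, ?_⟩
    · fin_cases hind <;> simp [altIndicators]
    · exact (PySem.Chars.exists_prefix_drop_iff_isIn ..).mpr
        ((PySem.Chars.isIn_iff_infix ..).mpr hinf) |>.imp (fun j h => h)
  · rintro ⟨p, hp, hex⟩
    have hinf := (PySem.Chars.isIn_iff_infix ..).mp
      ((PySem.Chars.exists_prefix_drop_iff_isIn ..).mp hex)
    fin_cases hp <;>
      exact ⟨_, by simp [verified_indicators], hinf⟩
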